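-- pv_equiv track=rewrite | github.com/sftroychance/DSATextbookExercises | W1D2 pointer based/reverse_consonants.py | reverseConsonants
-- ===== SOURCE A (Python) =====
-- def reverseConsonants(str):
--     if not str:
--         return ''
--
--     if len(str) == 1:
--         return str
--
--     VOWELS = 'aeiouAEIOU'
--     chars = list(str)
--
--     start = 0
--     end = len(str) - 1
--
--     while start < end:
--         if chars[start] not in VOWELS and chars[end] not in VOWELS:
--             chars[start], chars[end] = chars[end], chars[start]
--             start += 1
--             end -= 1
--             continue
--
--         while chars[start] in VOWELS:
--             start += 1
--
--         while chars[end] in VOWELS: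
--             end -= 1
--
--     return ''.join(chars)
-- ===== SOURCE B (Python) =====
-- def reverseConsonants(str):
--     VOWELS = 'aeiouAEIOU'
--     rev = iter([c for c in str if c not in VOWELS][::-1])
--     return ''.join(c if c in VOWELS else next(rev) for c in str)
-- ===== Notes on version B (the rewrite author's own statement) =====
-- stated objective: simpler
-- what changed: Replaced the in-place two-pointer swap loop (with nested vowel-skipping scans) by a collect/reverse/reinterleave pass: gather the consonants, reverse them, and rebuild the string taking vowels from the original and consonants from the reversed list.
import Mathlib
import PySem

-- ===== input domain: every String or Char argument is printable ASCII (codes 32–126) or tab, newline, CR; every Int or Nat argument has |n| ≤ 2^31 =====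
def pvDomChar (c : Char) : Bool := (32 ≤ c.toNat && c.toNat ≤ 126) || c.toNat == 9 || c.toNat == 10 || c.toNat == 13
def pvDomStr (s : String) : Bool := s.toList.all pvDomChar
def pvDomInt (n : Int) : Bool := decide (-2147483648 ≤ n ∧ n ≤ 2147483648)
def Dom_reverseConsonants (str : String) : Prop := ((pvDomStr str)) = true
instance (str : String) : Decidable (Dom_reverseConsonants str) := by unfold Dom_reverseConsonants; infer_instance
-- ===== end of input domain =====

-- B replaces A's in-place two-pointer swap loop by a collect/reverse/reinterleave pass (objective: simpler).

-- ===== PORT A =====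
-- 'aeiouAEIOU' and the char-in-string test `c in VOWELS`
def pvVowels : List Char := ['a', 'e', 'i', 'o', 'u', 'A', 'E', 'I', 'O', 'U']
def pvIsVowel (c : Char) : Bool := pvVowels.contains c

-- `while chars[start] in VOWELS: start += 1` — fueled (Python raises IndexError when the
-- index leaves the list: pyGet? = none; those inputs are excluded by Pre_, the port stops there)
def pvScanUpA (chars : List Char) : Nat → Int → Int
  | 0, i => i
  | f + 1, i =>
    match PySem.List.pyGet? chars i with
    | some c => if pvIsVowel c then pvScanUpA chars f (i + 1) else i
    | none => i

-- `while chars[end] in VOWELS: end -= 1`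
def pvScanDownA (chars : List Char) : Nat → Int → Int
  | 0, i => i
  | f + 1, i =>
    match PySem.List.pyGet? chars i with
    | some c => if pvIsVowel c then pvScanDownA chars f (i - 1) else i
    | none => i

-- the `while start < end` loop; fuel bounds the number of iterations (each iteration moves a
-- pointer by at least one, so the fuel supplied at the call site is never exhausted)
def pvLoopA (chars : List Char) : Nat → Int → Int → List Char
  | 0, _, _ => chars
  | f + 1, s, e =>
    if s < e then
      match PySem.List.pyGet? chars s, PySem.List.pyGet? chars e with
      | some cs, some ce =>
        if !pvIsVowel cs && !pvIsVowel ce then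
          -- chars[start], chars[end] = chars[end], chars[start]
          pvLoopA (PySem.List.pySetD (PySem.List.pySetD chars s ce) e cs) f (s + 1) (e - 1)
        else
          pvLoopA chars f (pvScanUpA chars (chars.length + 1) s)
            (pvScanDownA chars (2 * chars.length + 2) e)
      | _, _ => chars   -- IndexError (excluded by Pre_)
    else chars

def reverseConsonants (str : String) : String :=
  if str.toList.isEmpty then ""                 -- `if not str: return ''`
  else if str.toList.length = 1 then str        -- `if len(str) == 1: return str`
  else String.ofList                            -- `''.join(chars)`
    (pvLoopA str.toList (3 * str.toList.length + 4) 0 ((str.toList.length : Int) - 1))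

-- ===== PORT B =====
-- `''.join(c if c in VOWELS else next(rev) for c in str)`: vowels come from str, consonants
-- are drawn in order from the stack `rev`
def pvRebuild : List Char → List Char → List Char
  | [], _ => []
  | c :: cs, st =>
    if pvIsVowel c then c :: pvRebuild cs st
    else
      match st with
      | t :: ts => t :: pvRebuild cs ts
      | [] => c :: pvRebuild cs []   -- next() on an exhausted iterator: unreachable (rev holds one char per consonant)

-- rev = [c for c in str if c not in VOWELS][::-1], then the rebuild pass
def pvR (l : List Char) : List Char :=
  pvRebuild l ((l.filter (fun c => !pvIsVowel c)).reverse)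

def reverseConsonants_alt (str : String) : String :=
  String.ofList (pvR str.toList)

-- ===== PRECONDITION & SPEC =====
-- A raises IndexError exactly on strings of length ≥ 2 made entirely of vowels (its vowel-skip
-- scan runs past the end of the list); Pre_ excludes exactly those.
def Pre_reverseConsonants (str : String) : Prop :=
  ¬ (2 ≤ str.toList.length ∧ str.toList.all pvIsVowel = true)
instance (str : String) : Decidable (Pre_reverseConsonants str) := by
  unfold Pre_reverseConsonants; infer_instance

def pvWitness_reverseConsonants : String := "ab"

def Spec_reverseConsonants (str : String) (out : String) : Prop := out = reverseConsonants_alt str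
instance (str : String) (out : String) : Decidable (Spec_reverseConsonants str out) := by
  unfold Spec_reverseConsonants; infer_instance

-- ===== CLAIM (what is proved, stated in full; the proofs are below) =====
def Claim_equal_reverseConsonants : Prop := ∀ (str : String), Dom_reverseConsonants str → Pre_reverseConsonants str → Spec_reverseConsonants str (reverseConsonants str)

-- ===== LEMMAS AND PROOFS =====

-- consonant count
def pvCC (l : List Char) : Nat := l.countP (fun c => !pvIsVowel c)

theorem pvRebuild_length (l st : List Char) : (pvRebuild l st).length = l.length := by
  induction l generalizing st with
  | nil => rfl
  | cons c cs ih =>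
    by_cases h : pvIsVowel c = true
    · simp [pvRebuild, h, ih]
    · cases st with
      | nil => simp [pvRebuild, h, ih]
      | cons t ts => simp [pvRebuild, h, ih]

theorem pvR_length (l : List Char) : (pvR l).length = l.length := pvRebuild_length _ _

-- what pvRebuild puts at position i (enough stack)
theorem pvRebuild_getElem? (l : List Char) (st : List Char) (i : Nat)
    (hi : i < l.length) (hst : pvCC l ≤ st.length) :
    (pvRebuild l st)[i]? =
      if pvIsVowel l[i] then some l[i] else st[pvCC (l.take i)]? := by
  induction l generalizing st i with
  | nil => simp at hi
  | cons c cs ih =>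
    by_cases hv : pvIsVowel c = true
    · cases i with
      | zero => simp [pvRebuild, hv, pvCC]
      | succ i =>
        simp only [List.length_cons, Nat.add_lt_add_iff_right] at hi
        have hst' : pvCC cs ≤ st.length := by
          simp only [pvCC, List.countP_cons, hv] at hst ⊢; simpa using hst
        simp only [pvRebuild, hv, if_true, List.getElem?_cons_succ, List.getElem_cons_succ,
          List.take_succ_cons]
        rw [ih st i hi hst']
        simp [pvCC, List.countP_cons, hv]
    · have hcc : pvCC (c :: cs) = pvCC cs + 1 := by
        simp [pvCC, List.countP_cons, hv]
      cases st with
      | nil => rw [hcc] at hst; simp at hst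
      | cons t ts =>
        cases i with
        | zero => simp [pvRebuild, hv, pvCC]
        | succ i =>
          simp only [List.length_cons, Nat.add_lt_add_iff_right] at hi
          have hst' : pvCC cs ≤ ts.length := by
            simp only [List.length_cons] at hst; omega
          simp only [pvRebuild, hv, if_false, Bool.false_eq_true, List.getElem?_cons_succ,
            List.getElem_cons_succ, List.take_succ_cons]
          rw [ih ts i hi hst']
          simp [pvCC, List.countP_cons, hv]

-- the k-th consonant of l (counting from the left) read off the filtered list
theorem pvFilter_getElem? (l : List Char) (i : Nat) (hi : i < l.length)
    (hc : pvIsVowel l[i] = false) :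
    (l.filter (fun c => !pvIsVowel c))[pvCC (l.take i)]? = some l[i] := by
  induction l generalizing i with
  | nil => simp at hi
  | cons c cs ih =>
    cases i with
    | zero =>
      simp only [List.getElem_cons_zero] at hc
      simp [List.filter_cons, hc, pvCC]
    | succ i =>
      simp only [List.length_cons, Nat.add_lt_add_iff_right] at hi
      simp only [List.getElem_cons_succ] at hc
      by_cases hv : pvIsVowel c = true
      · simp only [List.filter_cons, hv, Bool.not_true, Bool.false_eq_true, if_false, List.take_succ_cons]
        have : pvCC (c :: cs.take i) = pvCC (cs.take i) := by
          simp [pvCC, List.countP_cons, hv]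
        rw [this, ih i hi hc]; rfl
      · simp only [List.filter_cons, List.take_succ_cons]
        have h1 : pvCC (c :: cs.take i) = pvCC (cs.take i) + 1 := by
          simp [pvCC, List.countP_cons, hv]
        rw [h1]
        simp only [Bool.not_eq_true] at hv
        simp [hv, ih i hi hc]

theorem pvCC_take_add (l : List Char) (a b : Nat) (hab : a ≤ b) :
    pvCC (l.take b) = pvCC (l.take a) + pvCC ((l.drop a).take (b - a)) := by
  conv_lhs => rw [← Nat.add_sub_cancel' hab, List.take_add]
  simp [pvCC, List.countP_append]

theorem pvCC_take_succ (l : List Char) (i : Nat) (hi : i < l.length) :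
    pvCC (l.take (i + 1)) = pvCC (l.take i) + (if pvIsVowel l[i] then 0 else 1) := by
  rw [List.take_add_one, List.getElem?_eq_getElem hi]
  by_cases hv : pvIsVowel l[i] = true <;>
    simp only [pvCC, List.countP_append, Option.toList_some, List.countP_cons, List.countP_nil,
      hv] <;> simp [hv]

theorem pvCC_split (l : List Char) (i : Nat) (hi : i < l.length) :
    pvCC l = pvCC (l.take i) + (if pvIsVowel l[i] then 0 else 1) + pvCC (l.drop (i + 1)) := by
  conv_lhs => rw [← List.take_append_drop (i + 1) l]
  rw [show pvCC (l.take (i + 1) ++ l.drop (i + 1)) = pvCC (l.take (i + 1)) + pvCC (l.drop (i + 1)) from by simp only [pvCC, List.countP_append]]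
  rw [pvCC_take_succ l i hi]

-- vowel positions are fixed by pvR
theorem pvR_getElem?_vowel (l : List Char) (i : Nat) (hi : i < l.length)
    (hv : pvIsVowel l[i] = true) : (pvR l)[i]? = some l[i] := by
  have hstl : pvCC l ≤ ((l.filter (fun c => !pvIsVowel c)).reverse).length := by
    simp [pvCC, List.countP_eq_length_filter]
  rw [pvR, pvRebuild_getElem? l _ i hi hstl]
  simp [hv]

-- matching consonant positions (same count left of s as right of e) are exchanged by pvR
theorem pvR_pair (l : List Char) (s e : Nat) (hs : s < l.length) (he : e < l.length)
    (hse : s ≤ e) (hcs : pvIsVowel l[s] = false) (hce : pvIsVowel l[e] = false)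
    (hk : pvCC (l.take s) = pvCC (l.drop (e + 1))) :
    (pvR l)[s]? = some l[e] ∧ (pvR l)[e]? = some l[s] := by
  have hlenf : (l.filter (fun c => !pvIsVowel c)).length = pvCC l := by
    simp [pvCC, List.countP_eq_length_filter]
  have hstl : pvCC l ≤ ((l.filter (fun c => !pvIsVowel c)).reverse).length := by
    simp [hlenf]
  have hsplit_s := pvCC_split l s hs
  have hsplit_e := pvCC_split l e he
  simp only [hcs, Bool.false_eq_true, if_false] at hsplit_s
  simp only [hce, Bool.false_eq_true, if_false] at hsplit_e
  have hmono := pvCC_take_add l s e hse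
  have hiks : pvCC (l.take s) < pvCC l := by omega
  have hike : pvCC (l.take e) < pvCC l := by omega
  constructor
  · rw [pvR, pvRebuild_getElem? l _ s hs hstl]
    simp only [hcs, Bool.false_eq_true, if_false]
    rw [List.getElem?_reverse (by rw [hlenf]; exact hiks), hlenf]
    rw [show pvCC l - 1 - pvCC (l.take s) = pvCC (l.take e) from by omega]
    exact pvFilter_getElem? l e he hce
  · rw [pvR, pvRebuild_getElem? l _ e he hstl]
    simp only [hce, Bool.false_eq_true, if_false]
    rw [List.getElem?_reverse (by rw [hlenf]; exact hike), hlenf]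
    rw [show pvCC l - 1 - pvCC (l.take e) = pvCC (l.take s) from by omega]
    exact pvFilter_getElem? l s hs hcs

-- pvR maps consonant positions to consonants
theorem pvR_getElem?_cons (l : List Char) (i : Nat) (hi : i < l.length)
    (hc : pvIsVowel l[i] = false) :
    ∃ d, (pvR l)[i]? = some d ∧ pvIsVowel d = false := by
  have hlenf : (l.filter (fun c => !pvIsVowel c)).length = pvCC l := by
    simp [pvCC, List.countP_eq_length_filter]
  have hstl : pvCC l ≤ ((l.filter (fun c => !pvIsVowel c)).reverse).length := by
    simp [hlenf]
  have hsplit := pvCC_split l i hi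
  simp only [hc, Bool.false_eq_true, if_false] at hsplit
  have hik : pvCC (l.take i) < pvCC l := by omega
  have hlt : pvCC (l.take i) < (l.filter (fun c => !pvIsVowel c)).reverse.length := by
    rw [List.length_reverse, hlenf]; exact hik
  rw [pvR, pvRebuild_getElem? l _ i hi hstl]
  simp only [hc, Bool.false_eq_true, if_false]
  refine ⟨_, List.getElem?_eq_getElem hlt, ?_⟩
  have hmem : (l.filter (fun c => !pvIsVowel c)).reverse[pvCC (l.take i)] ∈
      (l.filter (fun c => !pvIsVowel c)).reverse := List.getElem_mem _
  rw [List.mem_reverse] at hmem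
  have h2 := List.of_mem_filter hmem
  simpa using h2

theorem pvLoopA_exit (cl : List Char) (f : Nat) (s e : Int) (h : ¬ s < e) :
    pvLoopA cl f s e = cl := by
  cases f with
  | zero => rfl
  | succ f => simp [pvLoopA, h]

theorem pvScanUpA_spec (cl : List Char) (f s : Nat) (hs : s ≤ cl.length)
    (hf : cl.length - s < f) :
    ∃ s' : Nat, pvScanUpA cl f (s : Int) = (s' : Int) ∧ s ≤ s' ∧ s' ≤ cl.length ∧
      (∀ i : Nat, s ≤ i → i < s' → ∃ x, cl[i]? = some x ∧ pvIsVowel x = true) ∧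
      (∀ h : s' < cl.length, pvIsVowel cl[s'] = false) := by
  induction f generalizing s with
  | zero => omega
  | succ f ih =>
    by_cases hlt : s < cl.length
    · have hget : PySem.List.pyGet? cl (s : Int) = some cl[s] := by
        rw [PySem.List.pyGet?_natCast, List.getElem?_eq_getElem hlt]
      by_cases hv : pvIsVowel cl[s] = true
      · have hstep : pvScanUpA cl (f + 1) (s : Int) = pvScanUpA cl f ((s : Int) + 1) := by
          simp [pvScanUpA, hget, hv]
        have hcast : ((s : Int) + 1) = ((s + 1 : Nat) : Int) := by push_cast; ring
        obtain ⟨s', h1, h2, h3, h4, h5⟩ := ih (s + 1) (by omega) (by omega)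
        refine ⟨s', by rw [hstep, hcast, h1], by omega, h3, ?_, h5⟩
        intro i hi1 hi2
        rcases Nat.eq_or_lt_of_le hi1 with rfl | hgt
        · exact ⟨cl[s], List.getElem?_eq_getElem hlt, hv⟩
        · exact h4 i hgt hi2
      · refine ⟨s, by simp [pvScanUpA, hget, hv], le_refl s, by omega, ?_, ?_⟩
        · intro i hi1 hi2; omega
        · intro _; simpa using hv
    · have hs_eq : s = cl.length := by omega
      have hget : PySem.List.pyGet? cl (s : Int) = none := by
        rw [PySem.List.pyGet?_natCast, List.getElem?_eq_none_iff.mpr (by omega)]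
      refine ⟨s, by simp [pvScanUpA, hget], le_refl s, by omega, ?_, ?_⟩
      · intro i hi1 hi2; omega
      · intro h; omega

theorem pvScanDownA_spec (cl : List Char) (f e j : Nat) (hj : j ≤ e) (he : e < cl.length)
    (hcj : ∃ x, cl[j]? = some x ∧ pvIsVowel x = false) (hf : e - j < f) :
    ∃ e' : Nat, pvScanDownA cl f (e : Int) = (e' : Int) ∧ j ≤ e' ∧ e' ≤ e ∧
      (∀ i : Nat, e' < i → i ≤ e → ∃ x, cl[i]? = some x ∧ pvIsVowel x = true) ∧
      (∃ x, cl[e']? = some x ∧ pvIsVowel x = false) := by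
  induction f generalizing e with
  | zero => omega
  | succ f ih =>
    have hget : PySem.List.pyGet? cl (e : Int) = some cl[e] := by
      rw [PySem.List.pyGet?_natCast, List.getElem?_eq_getElem he]
    by_cases hv : pvIsVowel cl[e] = true
    · obtain ⟨x, hx1, hx2⟩ := hcj
      have hne : j ≠ e := by
        intro h; subst h
        rw [List.getElem?_eq_getElem (by omega)] at hx1
        rw [← Option.some_inj.mp hx1] at hx2
        exact absurd hv (by simp [hx2])
      have hje : j ≤ e - 1 := by omega
      have he1 : 1 ≤ e := by omega
      have hstep : pvScanDownA cl (f + 1) (e : Int) = pvScanDownA cl f ((e : Int) - 1) := by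
        simp [pvScanDownA, hget, hv]
      have hcast : ((e : Int) - 1) = ((e - 1 : Nat) : Int) := by omega
      obtain ⟨e', h1, h2, h3, h4, h5⟩ := ih (e - 1) hje (by omega) (by omega)
      refine ⟨e', by rw [hstep, hcast, h1], h2, by omega, ?_, h5⟩
      intro i hi1 hi2
      rcases Nat.eq_or_lt_of_le hi2 with rfl | hgt
      · exact ⟨cl[i], List.getElem?_eq_getElem he, hv⟩
      · exact h4 i hi1 (by omega)

    · refine ⟨e, by simp [pvScanDownA, hget, hv], hj, le_refl e, ?_, ?_⟩
      · intro i hi1 hi2; omega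
      · exact ⟨cl[e], List.getElem?_eq_getElem he, by simpa using hv⟩


theorem pvCC_eq_zero (m : List Char) (h : ∀ a ∈ m, pvIsVowel a = true) : pvCC m = 0 := by
  simp only [pvCC, List.countP_eq_zero]
  intro a ha; simp [h a ha]

theorem pvCC_pos_elim (m : List Char) (h : pvCC m ≠ 0) :
    ∃ (i : Nat) (hi : i < m.length), pvIsVowel m[i] = false := by
  have hpos : 0 < m.countP (fun c => !pvIsVowel c) := Nat.pos_of_ne_zero h
  obtain ⟨a, ha, hca⟩ := List.countP_pos_iff.mp hpos
  obtain ⟨i, hi, rfl⟩ := List.mem_iff_getElem.mp ha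
  exact ⟨i, hi, by simpa using hca⟩

theorem pvCC_seg_zero (l : List Char) (a b : Nat) (hb : b ≤ l.length)
    (h : ∀ i : Nat, a ≤ i → i < b → (hi : i < l.length) → pvIsVowel l[i] = true) :
    pvCC ((l.drop a).take (b - a)) = 0 := by
  apply pvCC_eq_zero
  intro x hx
  obtain ⟨i, hi, rfl⟩ := List.mem_iff_getElem.mp hx
  have hi1 : i < b - a := lt_of_lt_of_le hi (by simp)
  have hi2 : a + i < l.length := by
    have := hi; simp only [List.length_take, List.length_drop] at this; omega
  have : ((l.drop a).take (b - a))[i] = l[a + i]'hi2 := by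
    rw [List.getElem_take, List.getElem_drop]
  rw [this]
  exact h (a + i) (by omega) (by omega) hi2

theorem pvCC_drop_split (l : List Char) (a b : Nat) (ha : a ≤ b) (hb : b ≤ l.length) :
    pvCC (l.drop a) = pvCC ((l.drop a).take (b - a)) + pvCC (l.drop b) := by
  conv_lhs => rw [← List.take_append_drop (b - a) (l.drop a)]
  rw [show pvCC ((l.drop a).take (b - a) ++ (l.drop a).drop (b - a)) =
      pvCC ((l.drop a).take (b - a)) + pvCC ((l.drop a).drop (b - a)) from by
    simp only [pvCC, List.countP_append]]
  rw [List.drop_drop, Nat.add_sub_cancel' ha]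

theorem pvLoopA_step (cl : List Char) (f : Nat) (s e : Int) (hlt : s < e) (cs ce : Char)
    (hgs : PySem.List.pyGet? cl s = some cs) (hge : PySem.List.pyGet? cl e = some ce) :
    pvLoopA cl (f + 1) s e =
      if !pvIsVowel cs && !pvIsVowel ce then
        pvLoopA (PySem.List.pySetD (PySem.List.pySetD cl s ce) e cs) f (s + 1) (e - 1)
      else pvLoopA cl f (pvScanUpA cl (cl.length + 1) s)
        (pvScanDownA cl (2 * cl.length + 2) e) := by
  simp [pvLoopA, hlt, hgs, hge]

-- main invariant lemma: the two-pointer loop ends in pvR of the original list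
theorem pvLoopA_invariant (l : List Char) (f : Nat) (cl : List Char) (s e : Nat)
    (hlen : cl.length = l.length) (hse : s ≤ e) (he : e < l.length)
    (hfin : ∀ i : Nat, i < l.length → (i < s ∨ e < i) → cl[i]? = (pvR l)[i]?)
    (hreg : ∀ i : Nat, s ≤ i → i ≤ e → cl[i]? = l[i]?)
    (hk : pvCC (l.take s) = pvCC (l.drop (e + 1)))
    (hcons : pvCC l ≠ 0)
    (hf : e - s < f) :
    pvLoopA cl f (s : Int) (e : Int) = pvR l := by
  induction f generalizing cl s e with
  | zero => omega
  | succ f ih =>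
    have hsl : s < l.length := by omega
    have hscl : s < cl.length := by omega
    have hecl : e < cl.length := by omega
    have hveq_s : cl[s]'hscl = l[s]'hsl := by
      have h := hreg s (le_refl s) hse
      rwa [List.getElem?_eq_getElem hscl, List.getElem?_eq_getElem hsl, Option.some_inj] at h
    have hveq_e : cl[e]'hecl = l[e]'he := by
      have h := hreg e hse (le_refl e)
      rwa [List.getElem?_eq_getElem hecl, List.getElem?_eq_getElem he, Option.some_inj] at h
    by_cases hlt : s < e
    case neg =>
      -- s = e: the loop exits immediately and everything is already in place
      have hseq : s = e := by omega
      subst hseq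
      rw [pvLoopA_exit cl (f + 1) _ _ (by exact_mod_cast lt_irrefl (s : Int))]
      apply List.ext_getElem?
      intro i
      by_cases hi : i < l.length
      · by_cases his : i = s
        · subst his
          rw [hreg i (le_refl i) (le_refl i), List.getElem?_eq_getElem hsl]
          by_cases hv : pvIsVowel l[i] = true
          · rw [pvR_getElem?_vowel l i hi hv]
          · rw [(pvR_pair l i i hi hi (le_refl i) (by simpa using hv) (by simpa using hv) hk).1]
        · exact hfin i hi (by omega)
      · rw [List.getElem?_eq_none (by omega), List.getElem?_eq_none (by rw [pvR_length]; omega)]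
    case pos =>
      have hgs : PySem.List.pyGet? cl (s : Int) = some (cl[s]'hscl) := by
        rw [PySem.List.pyGet?_natCast, List.getElem?_eq_getElem hscl]
      have hge : PySem.List.pyGet? cl (e : Int) = some (cl[e]'hecl) := by
        rw [PySem.List.pyGet?_natCast, List.getElem?_eq_getElem hecl]
      rw [pvLoopA_step cl f (s : Int) (e : Int) (by exact_mod_cast hlt) _ _ hgs hge]
      by_cases hcc : (!pvIsVowel (cl[s]'hscl) && !pvIsVowel (cl[e]'hecl)) = true
      · -- swap branch
        rw [if_pos hcc]
        simp only [Bool.and_eq_true, Bool.not_eq_true'] at hcc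
        obtain ⟨hcs, hce⟩ := hcc
        rw [hveq_s] at hcs
        rw [hveq_e] at hce
        have hpair := pvR_pair l s e hsl he (le_of_lt hlt) hcs hce hk
        have hset : PySem.List.pySetD (PySem.List.pySetD cl (s : Int) (cl[e]'hecl)) (e : Int)
            (cl[s]'hscl) = (cl.set s (cl[e]'hecl)).set e (cl[s]'hscl) := by
          simp
        rw [hset]
        set cl' := (cl.set s (cl[e]'hecl)).set e (cl[s]'hscl) with hcl'
        have hlen' : cl'.length = l.length := by simp [hcl', hlen]
        have hunch : ∀ i : Nat, i ≠ s → i ≠ e → cl'[i]? = cl[i]? := by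
          intro i h1 h2
          rw [hcl', List.getElem?_set_ne (Ne.symm h2), List.getElem?_set_ne (Ne.symm h1)]
        have hats : cl'[s]? = some (l[e]'he) := by
          rw [hcl', List.getElem?_set_ne (by omega : e ≠ s), List.getElem?_set_self hscl, hveq_e]
        have hate : cl'[e]? = some (l[s]'hsl) := by
          rw [hcl', List.getElem?_set_self (by simpa using hecl), hveq_s]
        have hcast1 : ((s : Int) + 1) = ((s + 1 : Nat) : Int) := by push_cast; ring
        have hcast2 : ((e : Int) - 1) = ((e - 1 : Nat) : Int) := by omega
        rw [hcast1, hcast2]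
        have hkS : pvCC (l.take (s + 1)) = pvCC (l.take s) + 1 := by
          rw [pvCC_take_succ l s hsl]; simp [hcs]
        have hkE : pvCC (l.drop e) = pvCC (l.drop (e + 1)) + 1 := by
          simp only [pvCC]
          rw [List.drop_eq_getElem_cons he, List.countP_cons]
          simp [hce]
        by_cases hc2 : s + 1 ≤ e - 1
        · apply ih cl' (s + 1) (e - 1) hlen' hc2 (by omega) _ _ _ (by omega)
          · -- finalized zone
            intro i hi hcase
            by_cases his : i = s
            · subst his; rw [hats, hpair.1]
            · by_cases hie : i = e
              · subst hie; rw [hate, hpair.2]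
              · rw [hunch i his hie]
                exact hfin i hi (by omega)
          · -- region unchanged
            intro i h1 h2
            rw [hunch i (by omega) (by omega)]
            exact hreg i (by omega) (by omega)
          · -- counts
            rw [show e - 1 + 1 = e from by omega, hkS, hkE, hk]
        · -- the next iteration exits at once: show cl' is final
          rw [pvLoopA_exit cl' f _ _ (by omega)]
          apply List.ext_getElem?
          intro i
          by_cases hi : i < l.length
          · by_cases his : i = s
            · subst his; rw [hats, hpair.1]
            · by_cases hie : i = e
              · subst hie; rw [hate, hpair.2]
              · by_cases hmid : s < i ∧ i < e
                · -- single middle position (e = s + 2, i = s + 1)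
                  have hieq : i = s + 1 ∧ e = s + 2 := by omega
                  have hkmid : pvCC (l.take i) = pvCC (l.drop (i + 1)) := by
                    have h1 : pvCC (l.take i) = pvCC (l.take s) + 1 := by
                      rw [show i = s + 1 from hieq.1]; exact hkS
                    have h2 : pvCC (l.drop (i + 1)) = pvCC (l.drop (e + 1)) + 1 := by
                      rw [show i + 1 = e from by omega]; exact hkE
                    omega
                  rw [hunch i his hie, hreg i (by omega) (by omega),
                    List.getElem?_eq_getElem hi]
                  by_cases hv : pvIsVowel l[i] = true
                  · rw [pvR_getElem?_vowel l i hi hv]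
                  · rw [(pvR_pair l i i hi hi (le_refl i) (by simpa using hv)
                      (by simpa using hv) hkmid).1]
                · rw [hunch i his hie]
                  exact hfin i hi (by omega)
          · rw [List.getElem?_eq_none (by omega),
              List.getElem?_eq_none (by rw [pvR_length]; omega)]
      · -- scan branch: at least one endpoint is a vowel
        rw [if_neg hcc]
        have hvow : pvIsVowel (l[s]'hsl) = true ∨ pvIsVowel (l[e]'he) = true := by
          cases hbs : pvIsVowel (l[s]'hsl) with
          | true => exact Or.inl rfl
          | false =>
            cases hbe : pvIsVowel (l[e]'he) with
            | true => exact Or.inr rfl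
            | false => exact absurd (by rw [hveq_s, hveq_e, hbs, hbe]; rfl) hcc
        obtain ⟨s', hs'eq, hs'ge, hs'le, hs'vow, hs'cons⟩ :=
          pvScanUpA_spec cl (cl.length + 1) s (by omega) (by omega)
        have hexist : ∃ j : Nat, j ≤ e ∧ ∃ x, cl[j]? = some x ∧ pvIsVowel x = false := by
          obtain ⟨jl, hjl, hjlc⟩ := pvCC_pos_elim l hcons
          by_cases hje : jl ≤ e
          · by_cases hjs : jl < s
            · obtain ⟨d, hd, hdc⟩ := pvR_getElem?_cons l jl hjl hjlc
              exact ⟨jl, hje, d, by rw [hfin jl hjl (Or.inl hjs)]; exact hd, hdc⟩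
            · exact ⟨jl, hje, l[jl],
                by rw [hreg jl (by omega) hje]; exact List.getElem?_eq_getElem hjl, hjlc⟩
          · have hidx : jl - (e + 1) < (l.drop (e + 1)).length := by simp; omega
            have hmem : (l[jl]'hjl) ∈ l.drop (e + 1) := by
              have hgd : (l.drop (e + 1))[jl - (e + 1)]'hidx = l[jl]'hjl := by
                rw [List.getElem_drop]
                congr 1
                omega
              rw [← hgd]
              exact List.getElem_mem _
            have hdrop_pos : pvCC (l.drop (e + 1)) ≠ 0 := by
              have hp : 0 < (l.drop (e + 1)).countP (fun c => !pvIsVowel c) :=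
                List.countP_pos_iff.mpr ⟨_, hmem, by simp [hjlc]⟩
              simpa [pvCC] using hp.ne'
            have htake_pos : pvCC (l.take s) ≠ 0 := by rw [hk]; exact hdrop_pos
            obtain ⟨it, hit, hitc⟩ := pvCC_pos_elim (l.take s) htake_pos
            have hits : it < s := by have h2 := hit; simp at h2; omega
            have hitl : it < l.length := by have h2 := hit; simp at h2; omega
            have hval : (l.take s)[it]'hit = l[it]'hitl := List.getElem_take
            obtain ⟨d, hd, hdc⟩ := pvR_getElem?_cons l it hitl (by rw [← hval]; exact hitc)
            exact ⟨it, by omega, d, by rw [hfin it hitl (Or.inl hits)]; exact hd, hdc⟩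
        obtain ⟨j, hje, hjx⟩ := hexist
        obtain ⟨e', he'eq, he'ge, he'le, he'vow, he'cons⟩ :=
          pvScanDownA_spec cl (2 * cl.length + 2) e j hje hecl hjx (by omega)
        rw [hs'eq, he'eq]
        have hlv_low : ∀ i : Nat, s ≤ i → i < s' → (hil : i ≤ e) →
            pvIsVowel (l[i]'(by omega)) = true := by
          intro i h1 h2 h3
          obtain ⟨x, hx, hxv⟩ := hs'vow i h1 h2
          have hr := hreg i h1 h3
          rw [hx, List.getElem?_eq_getElem (show i < l.length by omega)] at hr
          exact Option.some_inj.mp hr ▸ hxv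
        have hlv_high : ∀ i : Nat, e' < i → s ≤ i → (hil : i ≤ e) →
            pvIsVowel (l[i]'(by omega)) = true := by
          intro i h1 h2 h3
          obtain ⟨x, hx, hxv⟩ := he'vow i h1 h3
          have hr := hreg i h2 h3
          rw [hx, List.getElem?_eq_getElem (show i < l.length by omega)] at hr
          exact Option.some_inj.mp hr ▸ hxv
        by_cases hlt2 : s' < e'
        · have hprog : s + 1 ≤ s' ∨ e' + 1 ≤ e := by
            cases hvow with
            | inl hv =>
              left
              by_contra hcon
              push_neg at hcon
              have hs'_eq : s' = s := by omega
              subst hs'_eq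
              have hc2 := hs'cons (by omega)
              rw [hveq_s, hv] at hc2
              exact Bool.true_eq_false.mp hc2
            | inr hv =>
              right
              by_contra hcon
              push_neg at hcon
              have he'_eq : e' = e := by omega
              obtain ⟨x, hx, hxc⟩ := he'cons
              rw [he'_eq, List.getElem?_eq_getElem hecl] at hx
              have hxe : x = cl[e]'hecl := (Option.some_inj.mp hx).symm
              rw [hxe, hveq_e, hv] at hxc
              exact Bool.true_eq_false.mp hxc
          apply ih cl s' e' hlen (le_of_lt hlt2) (by omega) _ _ _ (by omega)
          · intro i hi hcase
            by_cases hold : i < s ∨ e < i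
            · exact hfin i hi hold
            · push_neg at hold
              rcases hcase with hil | hih
              · rw [hreg i hold.1 hold.2,
                  pvR_getElem?_vowel l i hi (hlv_low i hold.1 hil hold.2),
                  List.getElem?_eq_getElem hi]
              · rw [hreg i hold.1 hold.2,
                  pvR_getElem?_vowel l i hi (hlv_high i hih hold.1 hold.2),
                  List.getElem?_eq_getElem hi]
          · intro i h1 h2
            exact hreg i (by omega) (by omega)
          · have h1 : pvCC (l.take s') = pvCC (l.take s) := by
              rw [pvCC_take_add l s s' hs'ge,
                pvCC_seg_zero l s s' (by omega)
                  (fun i hi1 hi2 hil => hlv_low i hi1 hi2 (by omega)), Nat.add_zero]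
            have h2 : pvCC (l.drop (e' + 1)) = pvCC (l.drop (e + 1)) := by
              rw [pvCC_drop_split l (e' + 1) (e + 1) (by omega) (by omega),
                pvCC_seg_zero l (e' + 1) (e + 1) (by omega)
                  (fun i hi1 hi2 hil => hlv_high i (by omega) (by omega) (by omega)),
                Nat.zero_add]
            rw [h1, h2, hk]
        · rw [pvLoopA_exit cl f _ _ (by exact_mod_cast hlt2)]
          apply List.ext_getElem?
          intro i
          by_cases hi : i < l.length
          · by_cases hold : i < s ∨ e < i
            · exact hfin i hi hold
            · push_neg at hold
              by_cases hil : i < s'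
              · rw [hreg i hold.1 hold.2,
                  pvR_getElem?_vowel l i hi (hlv_low i hold.1 hil hold.2),
                  List.getElem?_eq_getElem hi]
              · by_cases hih : e' < i
                · rw [hreg i hold.1 hold.2,
                    pvR_getElem?_vowel l i hi (hlv_high i hih hold.1 hold.2),
                    List.getElem?_eq_getElem hi]
                · have hieq : i = s' ∧ i = e' := by omega
                  obtain ⟨x, hx, hxc⟩ := he'cons
                  rw [← hieq.2] at hx
                  have hr := hreg i hold.1 hold.2
                  rw [hx, List.getElem?_eq_getElem hi] at hr
                  have hcons_i : pvIsVowel (l[i]'hi) = false := Option.some_inj.mp hr ▸ hxc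
                  have h1 : pvCC (l.take i) = pvCC (l.take s) := by
                    rw [pvCC_take_add l s i hold.1,
                      pvCC_seg_zero l s i (by omega)
                        (fun i0 hi1 hi2 hil0 => hlv_low i0 hi1 (by omega) (by omega)),
                      Nat.add_zero]
                  have h2 : pvCC (l.drop (i + 1)) = pvCC (l.drop (e + 1)) := by
                    rw [pvCC_drop_split l (i + 1) (e + 1) (by omega) (by omega),
                      pvCC_seg_zero l (i + 1) (e + 1) (by omega)
                        (fun i0 hi1 hi2 hil0 => hlv_high i0 (by omega) (by omega) (by omega)),
                      Nat.zero_add]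
                  have hkmid : pvCC (l.take i) = pvCC (l.drop (i + 1)) := by rw [h1, h2, hk]
                  rw [hreg i hold.1 hold.2,
                    (pvR_pair l i i hi hi (le_refl i) hcons_i hcons_i hkmid).1,
                    List.getElem?_eq_getElem hi]
          · rw [List.getElem?_eq_none (by omega),
              List.getElem?_eq_none (by rw [pvR_length]; omega)]

-- ===== VERDICT (by name: the statement is the Claim_ definition above) =====
theorem reverseConsonants_spec : Claim_equal_reverseConsonants := by
  unfold Claim_equal_reverseConsonants
  intro str _ hpre
  unfold Spec_reverseConsonants reverseConsonants reverseConsonants_alt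
  set l := str.toList with hl
  by_cases h0 : l.isEmpty
  · rw [if_pos h0]
    rw [List.isEmpty_iff.mp h0]
    rfl
  · rw [if_neg h0]
    by_cases h1 : l.length = 1
    · rw [if_pos h1]
      obtain ⟨c, hc⟩ := List.length_eq_one_iff.mp h1
      have hR : pvR l = l := by
        rw [hc]
        by_cases hv : pvIsVowel c = true <;> simp [pvR, pvRebuild, hv]
      rw [hR, hl]
      exact String.ofList_toList.symm
    · rw [if_neg h1]
      have hne : l ≠ [] := by simpa [List.isEmpty_iff] using h0
      have hlen2 : 2 ≤ l.length := by
        have hp : 0 < l.length := List.length_pos_of_ne_nil hne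
        omega
      have hcons : pvCC l ≠ 0 := by
        intro hz
        apply hpre
        refine ⟨by rw [← hl]; exact hlen2, ?_⟩
        have hall : ∀ a ∈ l, pvIsVowel a = true := by
          simpa [pvCC, List.countP_eq_zero] using hz
        rw [← hl]
        exact List.all_eq_true.mpr (fun c hc => hall c hc)
      have hmain := pvLoopA_invariant l (3 * l.length + 4) l 0 (l.length - 1)
        rfl (by omega) (by omega)
        (fun i hi hcase => absurd hcase (by omega))
        (fun i h1 h2 => rfl)
        (by rw [show l.length - 1 + 1 = l.length from by omega]
            simp [pvCC])
        hcons (by omega)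
      have hcast : ((l.length : Int) - 1) = ((l.length - 1 : Nat) : Int) := by omega
      rw [hcast]
      exact congrArg String.ofList (by exact_mod_cast hmain)
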